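-- pv_equiv track=rewrite | github.com/ovpn-to/service.vpn.manager | libs/vpnproviders.py | parseGitMetaData
-- ===== SOURCE A (Python) =====
-- def parseGitMetaData(metadata):
--     i = 0
--     timestamp = ""
--     version = 0
--     total_files = 0
--     file_list = []
--     i = 0
--     for line in metadata:
--         if i == 0: timestamp = line
--         if i == 1: version, total_files = line.split(" ")
--         if i > 1:
--             file_list.append(line)
--         i += 1
--     if len(file_list) == 0: file_list = None
--     return timestamp, version, total_files, file_list
-- ===== SOURCE B (Python) =====
-- def parseGitMetaData(metadata):
--     lines = list(metadata)
--     timestamp = lines[0] if lines else ""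
--     version = 0
--     total_files = 0
--     if len(lines) > 1:
--         version, total_files = lines[1].split(" ")
--     file_list = lines[2:] or None
--     return timestamp, version, total_files, file_list
-- ===== Notes on version B (the rewrite author's own statement) =====
-- stated objective: simpler
-- what changed: Replaces the index-counting loop that dispatches on i==0/i==1/i>1 with positional destructuring: head for the timestamp, lines[1].split(' ') tuple-unpack for version/total files, and a lines[2:] slice (empty -> None) for the file list.
-- outside the precondition, e.g. on parseGitMetaData(['2020']): A returns ('2020', 0, 0, None), B returns ('2020', 0, 0, None); on parseGitMetaData([]): A returns ('', 0, 0, None), B returns ('', 0, 0, None)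
import Mathlib
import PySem

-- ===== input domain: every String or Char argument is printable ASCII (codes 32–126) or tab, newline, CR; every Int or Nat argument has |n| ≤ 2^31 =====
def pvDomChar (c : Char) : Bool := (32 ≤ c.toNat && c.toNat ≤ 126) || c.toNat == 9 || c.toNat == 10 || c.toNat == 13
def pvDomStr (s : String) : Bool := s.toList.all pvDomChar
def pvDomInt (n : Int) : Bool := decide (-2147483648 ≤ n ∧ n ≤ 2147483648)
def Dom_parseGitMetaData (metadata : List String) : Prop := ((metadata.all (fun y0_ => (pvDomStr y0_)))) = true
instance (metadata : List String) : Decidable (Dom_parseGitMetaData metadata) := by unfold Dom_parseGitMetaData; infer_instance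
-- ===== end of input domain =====

-- B replaces A's index-counting dispatch loop with positional destructuring (head / split of line 1 / slice from 2) for simplicity; same cost.


-- ===== PORT A =====
-- Literal port of A: one fold over the lines carrying (i, timestamp, version, total_files, file_list).
-- version/total_files start as Python int 0, which is outside the String result type; Pre_ below
-- excludes those inputs, so the "" used here as the initial placeholder is never observed.
def parseGitMetaData (metadata : List String) : String × String × String × Option (List String) :=
  let st := metadata.foldl
    (fun (s : Int × String × String × String × List String) line =>
      let (i, timestamp, version, total_files, file_list) := s
      let timestamp := if i = 0 then line else timestamp
      let (version, total_files) :=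
        if i = 1 then
          match PySem.Str.split? line " " with
          | some [v, t] => (v, t)     -- tuple unpack; any other arity raises ValueError (outside Pre_)
          | _ => (version, total_files)
        else (version, total_files)
      let file_list := if i > 1 then file_list ++ [line] else file_list
      (i + 1, timestamp, version, total_files, file_list))
    (0, "", "", "", [])
  let (_, timestamp, version, total_files, file_list) := st
  (timestamp, version, total_files, if file_list.length = 0 then none else some file_list)

-- ===== PORT B =====
-- Port of B: positional destructuring — head, split of line 1, slice from 2.
def parseGitMetaData_alt (metadata : List String) : String × String × String × Option (List String) :=
  let timestamp := metadata.headD ""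
  let vt : String × String :=
    if metadata.length > 1 then
      -- tuple unpack of lines[1].split(" "); other arities raise ValueError (outside Pre_)
      let parts := (PySem.Str.split? (metadata.getD 1 "") " ").getD []
      if parts.length = 2 then (parts.headD "", (parts.drop 1).headD "") else ("", "")
    else ("", "")                      -- Python B returns ints 0 here (outside Pre_)
  let tail := metadata.drop 2
  (timestamp, vt.1, vt.2, if tail = [] then none else some tail)

-- ===== PRECONDITION & SPEC =====
-- Pre_ excludes inputs with fewer than two lines, where A returns Python ints 0 for version and
-- total_files (not values of the declared String type), and inputs whose second line does not split
-- on " " into exactly two parts, where A (and B) raise ValueError in the tuple unpack.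
def Pre_parseGitMetaData (metadata : List String) : Prop :=
  2 ≤ metadata.length ∧ ((PySem.Str.split? (metadata.getD 1 "") " ").getD []).length = 2
instance (metadata : List String) : Decidable (Pre_parseGitMetaData metadata) := by
  unfold Pre_parseGitMetaData; infer_instance
def pvWitness_parseGitMetaData : List String := ["2020-01-01", "3 2", "file1.ovpn", "file2.ovpn"]
def Spec_parseGitMetaData (metadata : List String) (out : String × String × String × Option (List String)) : Prop := out = parseGitMetaData_alt metadata
instance (metadata : List String) (out : String × String × String × Option (List String)) : Decidable (Spec_parseGitMetaData metadata out) := by unfold Spec_parseGitMetaData; infer_instance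

-- ===== CLAIM (what is proved, stated in full; the proofs are below) =====
def Claim_equal_parseGitMetaData : Prop := ∀ (metadata : List String), Dom_parseGitMetaData metadata → Pre_parseGitMetaData metadata → Spec_parseGitMetaData metadata (parseGitMetaData metadata)

-- ===== LEMMAS AND PROOFS =====
-- After the first two lines, every later i is > 1, so the fold only appends to file_list.
theorem pvFoldTail (rest : List String) (i : Int) (ts v tf : String) (fl : List String)
    (hi : 1 < i) :
    rest.foldl
      (fun (s : Int × String × String × String × List String) line =>
        let (i, timestamp, version, total_files, file_list) := s
        let timestamp := if i = 0 then line else timestamp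
        let (version, total_files) :=
          if i = 1 then
            match PySem.Str.split? line " " with
            | some [v, t] => (v, t)
            | _ => (version, total_files)
          else (version, total_files)
        let file_list := if i > 1 then file_list ++ [line] else file_list
        (i + 1, timestamp, version, total_files, file_list))
      (i, ts, v, tf, fl)
    = (i + rest.length, ts, v, tf, fl ++ rest) := by
  induction rest generalizing i fl with
  | nil => simp
  | cons x xs ih =>
    simp only [List.foldl_cons]
    have h0 : ¬ (i = 0) := by omega
    have h1 : ¬ (i = 1) := by omega
    simp only [h0, h1, if_false, hi, if_true]
    rw [ih (i + 1) (fl ++ [x]) (by omega)]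
    refine Prod.ext ?_ (by simp)
    simp only [List.length_cons]
    push_cast
    omega

-- ===== VERDICT (by name: the statement is the Claim_ definition above) =====
theorem parseGitMetaData_spec : Claim_equal_parseGitMetaData := by
  intro metadata _ hpre
  obtain ⟨hlen, hsplit⟩ := hpre
  obtain ⟨a, b, rest, rfl⟩ : ∃ a b rest, metadata = a :: b :: rest := by
    rcases metadata with _ | ⟨a, _ | ⟨b, rest⟩⟩
    · simp at hlen
    · simp at hlen
    · exact ⟨a, b, rest, rfl⟩
  simp only [List.getD_cons_succ, List.getD_cons_zero] at hsplit
  obtain ⟨v, t, hb⟩ : ∃ v t, PySem.Str.split? b " " = some [v, t] := by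
    cases h : PySem.Str.split? b " " with
    | none => rw [h] at hsplit; simp at hsplit
    | some l =>
      rw [h] at hsplit
      simp only [Option.getD_some] at hsplit
      obtain ⟨v, t, rfl⟩ := List.length_eq_two.mp hsplit
      exact ⟨v, t, rfl⟩
  clear hsplit
  show parseGitMetaData _ = parseGitMetaData_alt _
  simp only [parseGitMetaData, parseGitMetaData_alt, List.foldl_cons, hb]
  norm_num
  rw [pvFoldTail rest 2 a v t [] (by norm_num)]
  simp [hb]
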